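-- pv_equiv track=rewrite | github.com/aroethen/RBDtector | RBDtector/input_handling/input_reader.py | __read_annotation_header
-- ===== SOURCE A (Python) =====
-- from typing import Tuple, Dict, List
--
-- def __read_annotation_header(text_in_lines: List[str]) -> Tuple[Dict[str, str], int]:
--     """
--     Read header data of annotation data from input text file into a dictionary
--     :param text_in_lines: Output from file.readlines() of annotation text file
--     :return: Dictionary containing header data and index of first line of data
--     """
--
--     header: [Dict[str, str]] = {}
--     first_line_of_data: int = -1
--
--     # Read header data and find first line of data
--     for index, line in enumerate(text_in_lines):
--
--         key, separator, value = line.partition(':')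
--
--         if separator == '':
--             continue
--
--         if not key.isdecimal():
--             header[key.strip()] = value.strip()
--         else:
--             first_line_of_data = index
--             break
--
--     return header, first_line_of_data
-- ===== SOURCE B (Python) =====
-- from typing import Tuple, Dict, List
--
-- def __read_annotation_header(text_in_lines: List[str]) -> Tuple[Dict[str, str], int]:
--     # Two-pass decomposition: first find the data boundary, then build the
--     # header from the prefix before it in a dict comprehension.
--     first_line_of_data = next(
--         (i for i, line in enumerate(text_in_lines)
--          if line.partition(':')[1] != '' and line.partition(':')[0].isdecimal()),
--         -1)
--     prefix = text_in_lines if first_line_of_data == -1 else text_in_lines[:first_line_of_data]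
--     header = {key.strip(): value.strip()
--               for key, separator, value in (line.partition(':') for line in prefix)
--               if separator != '' and not key.isdecimal()}
--     return header, first_line_of_data
-- ===== Notes on version B (the rewrite author's own statement) =====
-- stated objective: alternative
-- what changed: Replaces A's single break-loop carrying a mutable dict and sentinel with two independent passes: a generator/next search for the first decimal-keyed line (the data boundary), then a dict comprehension over the prefix before that boundary.
import Mathlib
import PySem

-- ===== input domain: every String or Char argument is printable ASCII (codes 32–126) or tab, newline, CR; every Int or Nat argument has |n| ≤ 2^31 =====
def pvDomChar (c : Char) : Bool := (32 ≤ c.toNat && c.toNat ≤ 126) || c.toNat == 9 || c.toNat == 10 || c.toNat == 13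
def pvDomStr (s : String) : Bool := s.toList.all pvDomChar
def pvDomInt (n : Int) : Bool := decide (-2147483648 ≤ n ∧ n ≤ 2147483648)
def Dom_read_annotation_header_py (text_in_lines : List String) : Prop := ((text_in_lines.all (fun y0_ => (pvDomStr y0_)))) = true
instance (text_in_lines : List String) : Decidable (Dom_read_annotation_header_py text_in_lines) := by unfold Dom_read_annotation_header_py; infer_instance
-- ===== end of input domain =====

-- B replaces A's single break-loop (mutable dict + sentinel) with two independent passes:
-- a boundary search, then a header comprehension over the prefix; same cost (alternative decomposition).
-- str.isdecimal is ported as PySem.Str.strIsdigit, exact on the ASCII domain (they agree on ASCII).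

-- str.partition(':'), exact: (before, ':', after) at the FIRST ':'; (s, '', '') when absent.
def pyPartitionColon (s : String) : String × String × String :=
  match (s.toList.findIdx? (· == ':')) with
  | none => (s, "", "")
  | some j => (String.ofList (s.toList.take j), ":", String.ofList (s.toList.drop (j + 1)))

-- ===== PORT A =====
-- A's for-loop over enumerate(text_in_lines) with break; first_line_of_data stays -1 until the break.
def pvLoopA : List String → Nat → PySem.Dict String String → PySem.Dict String String × Int
  | [], _, header => (header, -1)
  | line :: rest, index, header =>
    let (key, separator, value) := pyPartitionColon line
    if separator == "" then pvLoopA rest (index + 1) header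
    else if !(PySem.Str.strIsdigit key) then
      pvLoopA rest (index + 1) (header.insert (PySem.Str.strip key) (PySem.Str.strip value))
    else (header, (index : Int))

def read_annotation_header_py (text_in_lines : List String) : (List (String × String)) × Int :=
  let (header, first_line_of_data) := pvLoopA text_in_lines 0 PySem.Dict.empty
  (header.items, first_line_of_data)

-- ===== PORT B =====
-- pass 1: next((i for i, line in enumerate(...) if sep != '' and key.isdecimal()), -1)
def pvFindBoundary : List String → Nat → Int
  | [], _ => -1
  | line :: rest, i =>
    if ((pyPartitionColon line).2.1 != "") && PySem.Str.strIsdigit (pyPartitionColon line).1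
    then (i : Int) else pvFindBoundary rest (i + 1)

-- pass 2: the dict comprehension over the prefix
def pvBuildHeader (lines : List String) : PySem.Dict String String :=
  lines.foldl (fun h line =>
    let (key, separator, value) := pyPartitionColon line
    if (separator != "") && !(PySem.Str.strIsdigit key)
    then h.insert (PySem.Str.strip key) (PySem.Str.strip value) else h) PySem.Dict.empty

def read_annotation_header_py_alt (text_in_lines : List String) : (List (String × String)) × Int :=
  let first_line_of_data := pvFindBoundary text_in_lines 0
  let header_lines := if first_line_of_data == -1 then text_in_lines
                else PySem.List.slice text_in_lines none (some first_line_of_data)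
  ((pvBuildHeader header_lines).items, first_line_of_data)

-- ===== PRECONDITION & SPEC =====
def Spec_read_annotation_header_py (text_in_lines : List String) (out : (List (String × String)) × Int) : Prop := out = read_annotation_header_py_alt text_in_lines
instance (text_in_lines : List String) (out : (List (String × String)) × Int) : Decidable (Spec_read_annotation_header_py text_in_lines out) := by unfold Spec_read_annotation_header_py; infer_instance

-- ===== CLAIM (what is proved, stated in full; the proofs are below) =====
def Claim_equal_read_annotation_header_py : Prop := ∀ (text_in_lines : List String), Dom_read_annotation_header_py text_in_lines → Spec_read_annotation_header_py text_in_lines (read_annotation_header_py text_in_lines)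

-- ===== LEMMAS AND PROOFS =====

-- the boundary predicate of B's two passes
def pvBoundP (line : String) : Bool :=
  ((pyPartitionColon line).2.1 != "") && PySem.Str.strIsdigit (pyPartitionColon line).1

-- the header step of B's second pass
def pvStep (h : PySem.Dict String String) (line : String) : PySem.Dict String String :=
  let (key, separator, value) := pyPartitionColon line
  if (separator != "") && !(PySem.Str.strIsdigit key)
  then h.insert (PySem.Str.strip key) (PySem.Str.strip value) else h

lemma pvBuildHeader_eq (lines : List String) :
    pvBuildHeader lines = lines.foldl pvStep PySem.Dict.empty := rfl

lemma pvFindBoundary_cons (line : String) (rest : List String) (i : Nat) :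
    pvFindBoundary (line :: rest) i =
      if pvBoundP line then (i : Int) else pvFindBoundary rest (i + 1) := rfl

lemma pvLoopA_cons (line : String) (rest : List String) (i : Nat) (h : PySem.Dict String String) :
    pvLoopA (line :: rest) i h =
      if pvBoundP line then (h, (i : Int)) else pvLoopA rest (i + 1) (pvStep h line) := by
  simp only [pvLoopA, pvBoundP, pvStep]
  by_cases hs : (pyPartitionColon line).2.1 = "" <;>
    by_cases hd : PySem.Chars.strIsdigit (pyPartitionColon line).1.toList = true <;>
      simp [hs, hd]

lemma pvFindBoundary_eq : ∀ (lines : List String) (i : Nat),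
    pvFindBoundary lines i =
      (match lines.findIdx? pvBoundP with
       | none => (-1 : Int)
       | some k => ((i + k : Nat) : Int))
  | [], _ => rfl
  | line :: rest, i => by
    rw [pvFindBoundary_cons]
    by_cases hb : pvBoundP line = true
    · simp [List.findIdx?_cons, hb]
    · simp only [List.findIdx?_cons, hb, Bool.false_eq_true, if_false,
        pvFindBoundary_eq rest (i + 1)]
      cases h : rest.findIdx? pvBoundP <;> simp <;> ring

-- A's loop computes B's two passes at once
lemma pvLoopA_eq : ∀ (lines : List String) (i : Nat) (h : PySem.Dict String String),
    pvLoopA lines i h =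
      (match lines.findIdx? pvBoundP with
       | none => ((lines.foldl pvStep h), (-1 : Int))
       | some k => ((lines.take k).foldl pvStep h, ((i + k : Nat) : Int)))
  | [], _, _ => rfl
  | line :: rest, i, h => by
    rw [pvLoopA_cons]
    by_cases hb : pvBoundP line = true
    · simp [List.findIdx?_cons, hb]
    · simp only [List.findIdx?_cons, hb, Bool.false_eq_true, if_false,
        pvLoopA_eq rest (i + 1) (pvStep h line)]
      cases hrest : rest.findIdx? pvBoundP <;> simp [List.foldl_cons] <;> ring

-- ===== VERDICT (by name: the statement is the Claim_ definition above) =====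
theorem read_annotation_header_py_spec : Claim_equal_read_annotation_header_py := by
  intro lines _
  unfold Spec_read_annotation_header_py
  unfold read_annotation_header_py read_annotation_header_py_alt
  rw [pvLoopA_eq, pvFindBoundary_eq]
  cases hf : lines.findIdx? pvBoundP with
  | none => simp [pvBuildHeader_eq]
  | some k =>
    have hk : (((0 + k : Nat) : Int) == (-1 : Int)) = false := by simp
    simp only [hk, Bool.false_eq_true, if_false]
    rw [PySem.List.slice_to lines (by positivity : (0:Int) ≤ ((0 + k : Nat) : Int))]
    simp [pvBuildHeader_eq]
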